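-- pv_equiv track=rewrite | github.com/johanrex/adventofcode | 2025/day02/py/day02.py | is_repeated_at_least_twice
-- ===== SOURCE A (Python) =====
-- def is_repeated_at_least_twice(num) -> bool:
--     if num < 10:
--         return False
--
--     num_s = str(num)
--     L = len(num_s)
--
--     for i in range(L // 2):
--         if L % (i + 1) != 0:
--             continue
--
--         part = num_s[: i + 1]
--         repeated = part * (L // (i + 1))
--         if repeated == num_s:
--             return True
--
--     return False
-- ===== SOURCE B (Python) =====
-- def is_repeated_at_least_twice(num) -> bool:
--     if num < 10:
--         return False
--     s = str(num)
--     return s in (s + s)[1:-1]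
-- ===== Notes on version B (the rewrite author's own statement) =====
-- stated objective: idiomatic
-- what changed: Replaces A's enumeration of candidate block lengths (divisor loop with per-divisor rebuild-and-compare) by the standard string-periodicity idiom: s is a repetition of a smaller block iff s occurs inside (s+s)[1:-1], a single substring search.
import Mathlib
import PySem

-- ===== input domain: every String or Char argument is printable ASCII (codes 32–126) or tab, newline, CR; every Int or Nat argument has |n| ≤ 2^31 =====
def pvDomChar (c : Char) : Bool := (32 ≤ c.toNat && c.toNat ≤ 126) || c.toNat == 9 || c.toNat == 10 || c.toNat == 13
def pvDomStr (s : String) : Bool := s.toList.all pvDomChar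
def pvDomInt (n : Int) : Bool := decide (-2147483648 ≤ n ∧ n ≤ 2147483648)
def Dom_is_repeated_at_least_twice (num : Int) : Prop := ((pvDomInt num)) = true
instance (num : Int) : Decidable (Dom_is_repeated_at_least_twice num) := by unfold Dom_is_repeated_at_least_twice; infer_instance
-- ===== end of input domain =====

-- B replaces A's divisor-enumeration loop by the string-periodicity idiom s ∈ (s+s)[1:-1] (idiomatic; same observable behaviour).

-- ===== PORT A =====
-- Python `part * k` for a string and k ≥ 0 (here k = L // (i+1) with L, i ≥ 0, so `.toNat` is exact).
def chMul (cs : List Char) : Nat → List Char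
  | 0 => []
  | n + 1 => cs ++ chMul cs n

-- the `for i in range(L // 2)` loop of A, with its early `return True`
def isRepLoop (s : List Char) (L : Int) : List Int → Bool
  | [] => false
  | i :: rest =>
    if PySem.Int.mod L (i + 1) ≠ 0 then isRepLoop s L rest
    else
      let part := PySem.List.slice s none (some (i + 1))
      let repeated := chMul part (PySem.Int.floordiv L (i + 1)).toNat
      if repeated = s then true else isRepLoop s L rest

def is_repeated_at_least_twice (num : Int) : Bool :=
  if num < 10 then false
  else
    let s := (PySem.Int.toStr num).toList
    let L : Int := (s.length : Int)
    isRepLoop s L (PySem.List.pyRange 0 (PySem.Int.floordiv L 2) 1)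

-- ===== PORT B =====
def is_repeated_at_least_twice_alt (num : Int) : Bool :=
  if num < 10 then false
  else
    let s := (PySem.Int.toStr num).toList
    PySem.Chars.isIn s (PySem.List.slice (s ++ s) (some 1) (some (-1)))

-- ===== PRECONDITION & SPEC =====
def Spec_is_repeated_at_least_twice (num : Int) (out : Bool) : Prop := out = is_repeated_at_least_twice_alt num
instance (num : Int) (out : Bool) : Decidable (Spec_is_repeated_at_least_twice num out) := by unfold Spec_is_repeated_at_least_twice; infer_instance

-- ===== CLAIM (what is proved, stated in full; the proofs are below) =====
def Claim_equal_is_repeated_at_least_twice : Prop := ∀ (num : Int), Dom_is_repeated_at_least_twice num → Spec_is_repeated_at_least_twice num (is_repeated_at_least_twice num)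

-- ===== LEMMAS AND PROOFS =====

theorem chMul_snoc (u : List Char) (k : Nat) : chMul u k ++ u = chMul u (k + 1) := by
  induction k with
  | zero => simp [chMul]
  | succ k ih => rw [chMul, List.append_assoc, ih]; rfl

-- the words u and t commute and |u| divides |t|: t is a power of u
theorem comm_pow (u : List Char) (hu : u ≠ []) :
    ∀ t : List Char, u.length ∣ t.length → t ++ u = u ++ t →
      t = chMul u (t.length / u.length) := by
  intro t
  induction ht : t.length using Nat.strong_induction_on generalizing t with
  | _ N ih =>
    subst ht
    intro hdvd hcomm
    rcases eq_or_ne t [] with rfl | htne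
    · simp [chMul]
    · have hupos : 0 < u.length := List.length_pos_iff.mpr hu
      have htpos : 0 < t.length := List.length_pos_iff.mpr htne
      have hle : u.length ≤ t.length := Nat.le_of_dvd htpos hdvd
      have htake : t.take u.length = u := by
        have h1 : (t ++ u).take u.length = t.take u.length :=
          List.take_append_of_le_length hle
        have h2 : (u ++ t).take u.length = u := List.take_left ..
        rw [hcomm] at h1; rw [h1] at h2; exact h2
      have hsplit : t = u ++ t.drop u.length := by
        conv_lhs => rw [← List.take_append_drop u.length t, htake]
      have hlen' : (t.drop u.length).length = t.length - u.length := by simp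
      have hcomm' : t.drop u.length ++ u = u ++ t.drop u.length := by
        have h3 : (u ++ t.drop u.length) ++ u = u ++ (u ++ t.drop u.length) := by
          rw [← hsplit]; exact hcomm
        rw [List.append_assoc] at h3
        exact List.append_cancel_left h3
      have hdvd' : u.length ∣ (t.drop u.length).length := by
        rw [hlen']; exact Nat.dvd_sub hdvd dvd_rfl
      have hIH : t.drop u.length = chMul u ((t.drop u.length).length / u.length) :=
        ih (t.drop u.length).length (by omega) _ rfl hdvd' hcomm'
      obtain ⟨c, hc⟩ := hdvd
      have hc1 : 1 ≤ c := by
        rcases Nat.eq_zero_or_pos c with rfl | h'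
        · omega
        · exact h'
      have hdiv' : (t.drop u.length).length / u.length = c - 1 := by
        rw [hlen', hc]
        have h4 : u.length * c - u.length = u.length * (c - 1) := by
          rw [Nat.mul_sub]; omega
        rw [h4, Nat.mul_div_cancel_left _ hupos]
      have hdiv : t.length / u.length = c := by
        rw [hc, Nat.mul_div_cancel_left _ hupos]
      calc t = u ++ t.drop u.length := hsplit
        _ = u ++ chMul u (c - 1) := by rw [← hdiv', ← hIH]
        _ = chMul u ((c - 1) + 1) := rfl
        _ = chMul u (t.length / u.length) := by rw [hdiv]; congr 1; omega

theorem rotate_mul_self (s : List Char) (j : Nat) (h : s.rotate j = s) :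
    ∀ k : Nat, s.rotate (j * k) = s := by
  intro k
  induction k with
  | zero => simp
  | succ k ih =>
    have h1 : j * (k + 1) = j * k + j := by ring
    rw [h1, ← List.rotate_rotate, ih, h]

theorem bezout_nat (j n : Nat) (hj : 0 < j) (hn : 0 < n) :
    ∃ k m : Nat, j * k = Nat.gcd j n + n * m := by
  set x := Nat.gcdA j n with hx
  set y := Nat.gcdB j n with hy
  have hbez : (Nat.gcd j n : ℤ) = j * x + n * y := Nat.gcd_eq_gcd_ab j n
  set t : ℤ := x.natAbs + y.natAbs + 1 with htdef
  have htpos : 0 < t := by positivity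
  have hk0 : 0 ≤ x + t * n := by
    have h1 : (x.natAbs : ℤ) + 1 ≤ t := by rw [htdef]; omega
    have h2 : t ≤ t * n := le_mul_of_one_le_right (le_of_lt htpos) (by exact_mod_cast hn)
    have h3 : -x ≤ (x.natAbs : ℤ) := by
      rw [← Int.natAbs_neg]; exact Int.le_natAbs
    linarith
  have hm0 : 0 ≤ (j : ℤ) * t - y := by
    have h1 : (y.natAbs : ℤ) + 1 ≤ t := by rw [htdef]; omega
    have h2 : t ≤ (j : ℤ) * t := le_mul_of_one_le_left (le_of_lt htpos) (by exact_mod_cast hj)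
    have h3 : y ≤ (y.natAbs : ℤ) := Int.le_natAbs
    linarith
  refine ⟨(x + t * n).toNat, ((j : ℤ) * t - y).toNat, ?_⟩
  have key : (j : ℤ) * ((x + t * n).toNat : ℤ)
      = (Nat.gcd j n : ℤ) + n * ((((j : ℤ) * t - y).toNat : ℤ)) := by
    rw [Int.toNat_of_nonneg hk0, Int.toNat_of_nonneg hm0, hbez]; ring
  exact_mod_cast key

theorem rotate_gcd_self (s : List Char) (j : Nat) (hj : 0 < j) (hjn : j < s.length)
    (h : s.rotate j = s) : s.rotate (Nat.gcd j s.length) = s := by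
  have hn : 0 < s.length := by omega
  obtain ⟨k, m, hkm⟩ := bezout_nat j s.length hj hn
  have h1 : s.rotate (j * k) = s := rotate_mul_self s j h k
  rw [hkm, ← List.rotate_rotate] at h1
  have hl : (s.rotate (Nat.gcd j s.length)).length = s.length := List.length_rotate ..
  have h2 := List.rotate_length_mul (s.rotate (Nat.gcd j s.length)) m
  rw [hl] at h2
  rw [h2] at h1
  exact h1

-- rotation by g, g ∣ |s|, fixing s makes s a power of its g-prefix
theorem rotate_dvd_pow (s : List Char) (g : Nat) (hg : 0 < g) (hgn : g ≤ s.length)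
    (hdvd : g ∣ s.length) (h : s.rotate g = s) :
    chMul (s.take g) (s.length / g) = s := by
  have hrot : s.drop g ++ s.take g = s := by
    rw [← List.rotate_eq_drop_append_take hgn, h]
  have hlen_take : (s.take g).length = g := by simp; omega
  have hune : s.take g ≠ [] := by
    intro hc; rw [hc] at hlen_take; simp at hlen_take; omega
  have hcomm : s.drop g ++ s.take g = s.take g ++ s.drop g := by
    rw [hrot]; exact (List.take_append_drop g s).symm
  have hdvd' : (s.take g).length ∣ (s.drop g).length := by
    rw [hlen_take, List.length_drop]; exact Nat.dvd_sub hdvd dvd_rfl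
  have hp := comm_pow (s.take g) hune (s.drop g) hdvd' hcomm
  obtain ⟨c, hc⟩ := hdvd
  have hc1 : 1 ≤ c := by
    rcases Nat.eq_zero_or_pos c with rfl | h'
    · omega
    · exact h'
  have hdiv' : (s.drop g).length / (s.take g).length = c - 1 := by
    rw [hlen_take, List.length_drop, hc]
    have h4 : g * c - g = g * (c - 1) := by rw [Nat.mul_sub]; omega
    rw [h4, Nat.mul_div_cancel_left _ hg]
  have hdiv : s.length / g = c := by rw [hc, Nat.mul_div_cancel_left _ hg]
  calc chMul (s.take g) (s.length / g)
      = chMul (s.take g) ((c - 1) + 1) := by rw [hdiv]; congr 1; omega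
    _ = s.take g ++ chMul (s.take g) (c - 1) := rfl
    _ = s.take g ++ s.drop g := by rw [← hdiv', ← hp]
    _ = s := List.take_append_drop g s

-- a power of a short block is fixed by the corresponding rotation
theorem pow_rotate (s : List Char) (d : Nat) (hd : 0 < d) (hdn : d ≤ s.length / 2)
    (hdvd : d ∣ s.length) (hs : s ≠ [])
    (h : chMul (s.take d) (s.length / d) = s) : s.rotate d = s := by
  have hn : 0 < s.length := List.length_pos_iff.mpr hs
  obtain ⟨c, hc⟩ := hdvd
  have h2d : 2 * d ≤ s.length := by omega
  have hc2 : 2 ≤ c := by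
    rcases Nat.lt_or_ge c 2 with hlt | hge
    · interval_cases c <;> omega
    · exact hge
  have hdiv : s.length / d = c := by rw [hc, Nat.mul_div_cancel_left _ hd]
  rw [hdiv] at h
  have hlu : (s.take d).length = d := by simp; omega
  have hsplit : chMul (s.take d) c = s.take d ++ chMul (s.take d) (c - 1) := by
    have h5 : c = (c - 1) + 1 := by omega
    conv_lhs => rw [h5]
    rfl
  have hdrop : s.drop d = chMul (s.take d) (c - 1) := by
    have h7 : s = s.take d ++ chMul (s.take d) (c - 1) := h.symm.trans hsplit
    conv_lhs => rw [h7]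
    rw [List.drop_append_of_le_length (le_of_eq hlu.symm)]
    have h8 : (s.take d).drop d = [] := by
      apply List.drop_eq_nil_of_le
      omega
    rw [h8, List.nil_append]
  have hle : d ≤ s.length := by omega
  rw [List.rotate_eq_drop_append_take hle, hdrop, chMul_snoc]
  have h6 : c - 1 + 1 = c := by omega
  rw [h6, h]

theorem existsRot_iff_infix (s : List Char) (hs : s ≠ []) :
    (∃ j : Nat, 0 < j ∧ j < s.length ∧ s.rotate j = s) ↔
      s <:+: (s ++ s).tail.dropLast := by
  have hn : 0 < s.length := List.length_pos_iff.mpr hs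
  constructor
  · rintro ⟨j, hj0, hjn, hrot⟩
    have hle : j ≤ s.length := by omega
    have hds : s.drop j ++ s.take j = s := by
      rw [← List.rotate_eq_drop_append_take hle, hrot]
    have hdecomp : s ++ s = s.take j ++ s ++ s.drop j := by
      have e2 : s.take j ++ s ++ s.drop j = s.take j ++ (s.drop j ++ s.take j) ++ s.drop j := by
        rw [hds]
      rw [e2]
      conv_lhs => rw [← List.take_append_drop j s]
      simp only [List.append_assoc]
    have htne : s.take j ≠ [] := by
      intro hc
      rcases List.take_eq_nil_iff.mp hc with h' | h'
      · omega
      · exact hs h'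
    have hdne : s.drop j ≠ [] := by
      intro hc
      have := List.drop_eq_nil_iff.mp hc
      omega
    obtain ⟨a, t', hcons⟩ := List.exists_cons_of_ne_nil htne
    rw [hdecomp, hcons]
    refine ⟨t', (s.drop j).dropLast, ?_⟩
    simp only [List.cons_append, List.tail_cons]
    rw [List.dropLast_append_of_ne_nil hdne]
  · rintro ⟨p, q, hpq⟩
    have hlens : p.length + s.length + q.length = s.length + s.length - 2 := by
      have := congrArg List.length hpq
      simp at this
      omega
    have hn2 : 2 ≤ s.length := by omega
    set j : Nat := p.length + 1 with hj
    have hjn : j < s.length := by omega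
    have hle : j ≤ s.length := by omega
    -- (s ++ s).tail.dropLast as take/drop of s ++ s
    have htd : (s ++ s).tail.dropLast
        = ((s ++ s).drop 1).take (s.length + s.length - 2) := by
      rw [← List.drop_one, List.dropLast_eq_take]
      congr 1
      simp only [List.length_drop, List.length_append]
      omega
    have hdropp : (((s ++ s).drop 1).take (s.length + s.length - 2)).drop p.length
        = s ++ q := by
      rw [← htd, ← hpq, List.append_assoc, List.drop_left]
    have h8 : (((s ++ s).drop 1).drop p.length).take (s.length + s.length - 2 - p.length)
        = s ++ q := by
      rw [← List.drop_take]
      exact hdropp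
    have hpre2 : s <+: ((s ++ s).drop 1).drop p.length := by
      have hpre1 : s <+: (((s ++ s).drop 1).drop p.length).take (s.length + s.length - 2 - p.length) :=
        ⟨q, h8.symm⟩
      exact hpre1.trans (List.take_prefix _ _)
    have hdd : ((s ++ s).drop 1).drop p.length = (s ++ s).drop j := by
      rw [List.drop_drop]
      congr 1
      omega
    rw [hdd] at hpre2
    have hdj : (s ++ s).drop j = s.drop j ++ s := by
      rw [List.drop_append_of_le_length hle]
    have hseq : s = ((s ++ s).drop j).take s.length := List.prefix_iff_eq_take.mp hpre2
    have hlend : (s.drop j).length = s.length - j := by simp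
    have hrot : s.rotate j = s := by
      rw [List.rotate_eq_drop_append_take hle]
      have h10 : ((s ++ s).drop j).take s.length = s.drop j ++ s.take j := by
        rw [hdj, List.take_append]
        congr 1
        · exact List.take_of_length_le (by rw [hlend]; omega)
        · congr 1
          rw [hlend]
          omega
      exact h10.symm.trans hseq.symm
    exact ⟨j, by omega, hjn, hrot⟩

theorem existsDiv_iff_existsRot (s : List Char) (hs : s ≠ []) :
    (∃ d : Nat, 1 ≤ d ∧ d ≤ s.length / 2 ∧ d ∣ s.length ∧ chMul (s.take d) (s.length / d) = s)
      ↔ (∃ j : Nat, 0 < j ∧ j < s.length ∧ s.rotate j = s) := by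
  have hn : 0 < s.length := List.length_pos_iff.mpr hs
  constructor
  · rintro ⟨d, hd1, hd2, hdvd, h⟩
    refine ⟨d, by omega, by omega, pow_rotate s d (by omega) hd2 hdvd hs h⟩
  · rintro ⟨j, hj0, hjn, hrot⟩
    set g := Nat.gcd j s.length with hg
    have hgpos : 0 < g := Nat.gcd_pos_of_pos_left _ hj0
    have hgdvd : g ∣ s.length := Nat.gcd_dvd_right ..
    have hgj : g ≤ j := Nat.le_of_dvd hj0 (Nat.gcd_dvd_left ..)
    have hgn : g < s.length := by omega
    obtain ⟨c, hc⟩ := hgdvd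
    have hc2 : 2 ≤ c := by
      rcases Nat.lt_or_ge c 2 with hlt | hge
      · interval_cases c <;> omega
      · exact hge
    have h2g : 2 * g ≤ s.length := by
      calc 2 * g = g * 2 := by ring
        _ ≤ g * c := Nat.mul_le_mul_left _ hc2
        _ = s.length := hc.symm
    have hghalf : g ≤ s.length / 2 := by omega
    exact ⟨g, by omega, hghalf, ⟨c, hc⟩,
      rotate_dvd_pow s g hgpos (by omega) ⟨c, hc⟩ (rotate_gcd_self s j hj0 hjn hrot)⟩

theorem isRepLoop_iff (s : List Char) (L : Int) (is : List Int) :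
    isRepLoop s L is = true ↔ ∃ i ∈ is, PySem.Int.mod L (i + 1) = 0 ∧
      chMul (PySem.List.slice s none (some (i + 1))) (PySem.Int.floordiv L (i + 1)).toNat = s := by
  induction is with
  | nil => simp [isRepLoop]
  | cons i rest ih =>
    by_cases h1 : PySem.Int.mod L (i + 1) = 0
    · by_cases h2 : chMul (PySem.List.slice s none (some (i + 1))) (PySem.Int.floordiv L (i + 1)).toNat = s
      · refine ⟨fun _ => ⟨i, List.mem_cons_self .., h1, h2⟩, fun _ => by simp [isRepLoop, h1, h2]⟩
      · rw [show isRepLoop s L (i :: rest) = isRepLoop s L rest from by simp [isRepLoop, h1, h2], ih]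
        constructor
        · rintro ⟨x, hx, hxx⟩
          exact ⟨x, List.mem_cons_of_mem _ hx, hxx⟩
        · rintro ⟨x, hx, hm, hr⟩
          rcases List.mem_cons.mp hx with rfl | hx'
          · exact absurd hr h2
          · exact ⟨x, hx', hm, hr⟩
    · rw [show isRepLoop s L (i :: rest) = isRepLoop s L rest from by simp [isRepLoop, h1], ih]
      constructor
      · rintro ⟨x, hx, hxx⟩
        exact ⟨x, List.mem_cons_of_mem _ hx, hxx⟩
      · rintro ⟨x, hx, hm, hr⟩
        rcases List.mem_cons.mp hx with rfl | hx'
        · exact absurd hm h1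
        · exact ⟨x, hx', hm, hr⟩

theorem floordiv_len_two (n : Nat) : PySem.Int.floordiv ((n : Int)) 2 = ((n / 2 : Nat) : Int) := by
  exact_mod_cast PySem.Int.floordiv_natCast n 2

theorem A_char (s : List Char) :
    (isRepLoop s ((s.length : Int)) (PySem.List.pyRange 0 (PySem.Int.floordiv ((s.length : Int)) 2) 1) = true)
      ↔ ∃ d : Nat, 1 ≤ d ∧ d ≤ s.length / 2 ∧ d ∣ s.length ∧ chMul (s.take d) (s.length / d) = s := by
  rw [isRepLoop_iff]
  constructor
  · rintro ⟨i, hi, hmod, hrep⟩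
    rw [PySem.List.mem_pyRange_iff_of_pos (by norm_num)] at hi
    obtain ⟨hi0, hilt, -⟩ := hi
    rw [floordiv_len_two] at hilt
    have hdi : (((i + 1).toNat : Nat) : Int) = i + 1 := Int.toNat_of_nonneg (by omega)
    refine ⟨(i + 1).toNat, by omega, by omega, ?_, ?_⟩
    · rw [PySem.Int.mod_eq_zero_iff_dvd] at hmod
      have h12 : (((i + 1).toNat : Nat) : Int) ∣ ((s.length : Nat) : Int) := by rwa [hdi]
      exact_mod_cast h12
    · have hfd2 : PySem.Int.floordiv ((s.length : Int)) (i + 1)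
          = ((s.length / (i + 1).toNat : Nat) : Int) := by
        rw [← hdi]
        exact_mod_cast PySem.Int.floordiv_natCast s.length (i + 1).toNat
      rw [PySem.List.slice_to s (by omega), hfd2, Int.toNat_natCast] at hrep
      exact hrep
  · rintro ⟨d, hd1, hd2, hdvd, hrep⟩
    refine ⟨((d : Nat) : Int) - 1, ?_, ?_, ?_⟩
    · rw [PySem.List.mem_pyRange_iff_of_pos (by norm_num), floordiv_len_two]
      refine ⟨by omega, by omega, one_dvd _⟩
    · rw [PySem.Int.mod_eq_zero_iff_dvd]
      have h9 : ((d : Nat) : Int) - 1 + 1 = ((d : Nat) : Int) := by ring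
      rw [h9]
      exact_mod_cast hdvd
    · have h9 : ((d : Nat) : Int) - 1 + 1 = ((d : Nat) : Int) := by ring
      rw [h9, PySem.List.slice_to s (by exact_mod_cast Nat.zero_le d)]
      rw [show (((d : Nat) : Int)).toNat = d from Int.toNat_natCast d]
      rw [PySem.Int.floordiv_natCast s.length d]
      simpa using hrep

theorem slice_one_negone (xs : List Char) (h : 1 ≤ xs.length) :
    PySem.List.slice xs (some 1) (some (-1)) = xs.tail.dropLast := by
  have hxne : xs ≠ [] := by
    intro hc
    subst hc
    simp at h
  have hca : PySem.List.clampIdx xs.length 1 = 1 := by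
    unfold PySem.List.clampIdx
    rw [if_neg (by omega)]
    omega
  have hcb : PySem.List.clampIdx xs.length (-1) = xs.length - 1 := by
    unfold PySem.List.clampIdx
    rw [if_pos (by omega), if_neg (by omega)]
    omega
  simp only [PySem.List.slice, hca, hcb]
  rw [← List.drop_one, List.dropLast_eq_take]
  congr 1
  simp only [List.length_drop]

theorem toChars_ne_nil (n : Int) : PySem.Int.toChars n ≠ [] := by
  unfold PySem.Int.toChars
  split
  · simp
  · rw [Nat.toDigits_eq_if (by norm_num)]
    split <;> simp

-- ===== VERDICT (by name: the statement is the Claim_ definition above) =====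
theorem is_repeated_at_least_twice_spec : Claim_equal_is_repeated_at_least_twice := by
  intro num _
  unfold Spec_is_repeated_at_least_twice is_repeated_at_least_twice is_repeated_at_least_twice_alt
  by_cases h : num < 10
  · simp [h]
  · simp only [if_neg h]
    have hs : (PySem.Int.toStr num).toList ≠ [] := by
      rw [PySem.Int.toList_toStr]
      exact toChars_ne_nil num
    set s := (PySem.Int.toStr num).toList with hsdef
    have h2 : 1 ≤ s.length := by
      have := List.length_pos_iff.mpr hs
      omega
    show isRepLoop s ((s.length : Int)) (PySem.List.pyRange 0 (PySem.Int.floordiv ((s.length : Int)) 2) 1)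
        = PySem.Chars.isIn s (PySem.List.slice (s ++ s) (some 1) (some (-1)))
    rw [slice_one_negone (s ++ s) (by simp only [List.length_append]; omega)]
    have hiff : (isRepLoop s ((s.length : Int)) (PySem.List.pyRange 0 (PySem.Int.floordiv ((s.length : Int)) 2) 1) = true)
        ↔ (PySem.Chars.isIn s ((s ++ s).tail.dropLast) = true) := by
      rw [A_char, PySem.Chars.isIn_iff_infix, existsDiv_iff_existsRot s hs, existsRot_iff_infix s hs]
    exact Bool.eq_iff_iff.mpr hiff
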